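-- pv_equiv track=rewrite | github.com/ChzFlvrHrse/MODU | backend/functions/section_pages_detection.py | division_parser
-- ===== SOURCE A (Python) =====
-- def division_parser(section_pages: dict) -> dict:
--     divisions_dict = {}
--     for section, page_indices in section_pages.items():
--         div_key = section[0:2]
--         if div_key not in divisions_dict:
--             divisions_dict[div_key] = {}
--         divisions_dict[div_key][section] = page_indices
--     return divisions_dict
-- ===== SOURCE B (Python) =====
-- def division_parser(section_pages: dict) -> dict:
--     # Two-pass sort-free grouping: first collect the distinct 2-char prefixes in
--     # first-occurrence order, then build each division by filtering the items.
--     prefixes = list(dict.fromkeys(section[0:2] for section in section_pages))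
--     return {
--         prefix: {section: pages
--                  for section, pages in section_pages.items()
--                  if section[0:2] == prefix}
--         for prefix in prefixes
--     }
-- ===== Notes on version B (the rewrite author's own statement) =====
-- stated objective: alternative
-- what changed: Replaces A's single-pass incremental bucket insertion into a nested dict with a two-pass scheme: first an ordered dedup of the 2-char prefixes, then one filtering comprehension per prefix.
import Mathlib
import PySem

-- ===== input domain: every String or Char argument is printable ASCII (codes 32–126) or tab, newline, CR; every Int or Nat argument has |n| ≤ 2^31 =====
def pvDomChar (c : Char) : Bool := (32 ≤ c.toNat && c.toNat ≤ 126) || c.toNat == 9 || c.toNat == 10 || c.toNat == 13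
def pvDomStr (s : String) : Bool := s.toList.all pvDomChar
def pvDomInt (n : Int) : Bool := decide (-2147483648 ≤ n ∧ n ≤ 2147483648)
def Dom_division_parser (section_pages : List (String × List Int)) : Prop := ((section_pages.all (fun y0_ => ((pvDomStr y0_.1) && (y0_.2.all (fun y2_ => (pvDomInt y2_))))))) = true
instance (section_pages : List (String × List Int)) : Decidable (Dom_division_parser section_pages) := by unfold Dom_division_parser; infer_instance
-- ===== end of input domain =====

-- B replaces A's single-pass bucket insertion with a two-pass scheme (ordered dedup of the
-- 2-char prefixes, then one filter per prefix); same result, no speed claim.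


-- shared helper: section[0:2]
def pvKey (s : String) : String := PySem.Str.slice s (some 0) (some 2)

-- ===== PORT A =====
-- for section, page_indices: if div_key not in d: d[div_key] = {}; d[div_key][section] = page_indices
def division_parser (section_pages : List (String × List Int)) : List (String × List (String × List Int)) :=
  let divisions_dict : PySem.Dict String (PySem.Dict String (List Int)) :=
    section_pages.foldl
      (fun d p =>
        let divKey := pvKey p.1
        let d' := if d.contains divKey then d else d.insert divKey PySem.Dict.empty
        d'.modify divKey PySem.Dict.empty (fun inner => inner.insert p.1 p.2))
      PySem.Dict.empty
  divisions_dict.items.map (fun q => (q.1, q.2.items))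

-- ===== PORT B =====
-- prefixes = list(dict.fromkeys(...)); then one filtering comprehension per prefix
def division_parser_alt (section_pages : List (String × List Int)) : List (String × List (String × List Int)) :=
  let prefixes := PySem.List.dedup (section_pages.map (fun p => pvKey p.1))
  prefixes.map (fun pre => (pre, section_pages.filter (fun q => pvKey q.1 == pre)))

-- ===== PRECONDITION & SPEC =====
-- Pre_ excludes association lists with duplicate section keys: A's parameter is a Python dict,
-- whose keys are necessarily distinct, so such lists do not represent any Python input.
def Pre_division_parser (section_pages : List (String × List Int)) : Prop :=
  (section_pages.map Prod.fst).Nodup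

instance (section_pages : List (String × List Int)) : Decidable (Pre_division_parser section_pages) := by
  unfold Pre_division_parser; infer_instance

def pvWitness_division_parser : (List (String × List Int)) :=
  [("AB one", [1, 2]), ("AB two", [3]), ("CD", [])]

def Spec_division_parser (section_pages : List (String × List Int)) (out : List (String × List (String × List Int))) : Prop := out = division_parser_alt section_pages
instance (section_pages : List (String × List Int)) (out : List (String × List (String × List Int))) : Decidable (Spec_division_parser section_pages out) := by unfold Spec_division_parser; infer_instance

-- ===== CLAIM (what is proved, stated in full; the proofs are below) =====
def Claim_equal_division_parser : Prop := ∀ (section_pages : List (String × List Int)), Dom_division_parser section_pages → Pre_division_parser section_pages → Spec_division_parser section_pages (division_parser section_pages)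

-- ===== LEMMAS AND PROOFS =====

-- the shape of A's accumulator after processing sp, expressed with B's vocabulary
def pvGroups (sp : List (String × List Int)) : List (String × PySem.Dict String (List Int)) :=
  (PySem.List.dedup (sp.map (fun p => pvKey p.1))).map
    (fun pre => (pre, PySem.Dict.mk (sp.filter (fun q => pvKey q.1 == pre))))

lemma pvFold_eq (sp : List (String × List Int)) (h : (sp.map Prod.fst).Nodup) :
    sp.foldl
      (fun (d : PySem.Dict String (PySem.Dict String (List Int))) p =>
        let divKey := pvKey p.1
        let d' := if d.contains divKey then d else d.insert divKey PySem.Dict.empty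
        d'.modify divKey PySem.Dict.empty (fun inner => inner.insert p.1 p.2))
      PySem.Dict.empty
    = PySem.Dict.mk (pvGroups sp) := by
  induction sp using List.reverseRecOn with
  | nil => rfl
  | append_singleton sp x ih =>
    obtain ⟨s, v⟩ := x
    rw [List.map_append, List.nodup_append] at h
    obtain ⟨h1, _, h2⟩ := h
    have hs : s ∉ sp.map Prod.fst := by
      intro hmem
      exact h2 s hmem s (by simp) rfl
    rw [List.foldl_append, ih h1]
    simp only [List.foldl_cons, List.foldl_nil]
    show (let d : PySem.Dict String (PySem.Dict String (List Int)) := PySem.Dict.mk (pvGroups sp)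
           let divKey := pvKey s
           let d' := if d.contains divKey then d else d.insert divKey PySem.Dict.empty
           d'.modify divKey PySem.Dict.empty (fun inner => inner.insert s v))
         = PySem.Dict.mk (pvGroups (sp ++ [(s, v)]))
    simp only []
    have hkeys : (PySem.Dict.mk (pvGroups sp)).keys = PySem.List.dedup (sp.map (fun p => pvKey p.1)) := by
      simp [PySem.Dict.keys, pvGroups, List.map_map, Function.comp_def]
    have hknodup : (PySem.Dict.mk (pvGroups sp)).keys.Nodup := by
      rw [hkeys]; exact PySem.List.nodup_dedup _
    by_cases hcont : (PySem.Dict.mk (pvGroups sp)).contains (pvKey s) = true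
    · -- div_key already present
      have hk : pvKey s ∈ sp.map (fun p => pvKey p.1) := by
        rw [PySem.Dict.contains_eq_decide_mem_keys, hkeys] at hcont
        exact (PySem.List.mem_dedup _ _).mp (of_decide_eq_true hcont)
      have hmemP : pvKey s ∈ PySem.List.dedup (sp.map (fun p => pvKey p.1)) :=
        (PySem.List.mem_dedup _ _).mpr hk
      rw [if_pos hcont]
      have hitem : (pvKey s, PySem.Dict.mk (sp.filter (fun q => pvKey q.1 == pvKey s)))
          ∈ (PySem.Dict.mk (pvGroups sp)).items := List.mem_map.mpr ⟨pvKey s, hmemP, rfl⟩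
      have hgetD := PySem.Dict.getD_of_mem_items _ hitem hknodup PySem.Dict.empty
      rw [PySem.Dict.modify, hgetD]
      have hscont : (PySem.Dict.mk (sp.filter (fun q => pvKey q.1 == pvKey s))).contains s = false := by
        rw [PySem.Dict.contains_eq_decide_mem_keys, decide_eq_false_iff_not]
        intro hmem
        rw [PySem.Dict.keys_mk] at hmem
        rcases List.mem_map.mp hmem with ⟨q, hq, hq1⟩
        exact hs (List.mem_map.mpr ⟨q, (List.mem_filter.mp hq).1, hq1⟩)
      apply PySem.Dict.ext
      rw [PySem.Dict.items_insert_of_contains _ _ hcont]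
      have hG' : pvGroups (sp ++ [(s, v)])
          = (PySem.List.dedup (sp.map (fun p => pvKey p.1))).map
              (fun pre => (pre, PySem.Dict.mk ((sp ++ [(s, v)]).filter (fun q => pvKey q.1 == pre)))) := by
        unfold pvGroups
        simp only [List.map_append, List.map_cons, List.map_nil]
        rw [PySem.List.dedup_eq_ofList, PySem.Set.ofList_append_singleton,
          PySem.Set.add_of_mem ((PySem.Set.mem_ofList _ _).mpr hk), ← PySem.List.dedup_eq_ofList]
      show _ = pvGroups (sp ++ [(s, v)])
      rw [hG']
      show List.map _ (List.map _ _) = _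
      rw [List.map_map]
      apply List.map_congr_left
      intro pre hpre
      simp only [Function.comp_apply]
      by_cases hpk : pre = pvKey s
      · subst hpk
        simp only [List.filter_append, beq_self_eq_true, if_true]
        refine congrArg _ (PySem.Dict.ext ?_)
        rw [PySem.Dict.items_insert_of_not_contains _ _ hscont]
        simp
      · have hb1 : (pre == pvKey s) = false := beq_eq_false_iff_ne.mpr hpk
        have hb2 : (pvKey s == pre) = false := beq_eq_false_iff_ne.mpr (Ne.symm hpk)
        simp [List.filter_append, hb1, hb2]
    · -- new div_key
      have hk : pvKey s ∉ sp.map (fun p => pvKey p.1) := fun hmem => hcont (by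
        rw [PySem.Dict.contains_eq_decide_mem_keys, hkeys]
        exact decide_eq_true ((PySem.List.mem_dedup _ _).mpr hmem))
      have hcf : (PySem.Dict.mk (pvGroups sp)).contains (pvKey s) = false := by
        rw [← Bool.not_eq_true]; exact hcont
      rw [if_neg hcont]
      rw [PySem.Dict.modify, PySem.Dict.getD_insert_self]
      apply PySem.Dict.ext
      rw [PySem.Dict.items_insert_of_contains _ _ (PySem.Dict.contains_insert_self _ _ _),
        PySem.Dict.items_insert_of_not_contains _ _ hcf]
      have hfilnil : sp.filter (fun q => pvKey q.1 == pvKey s) = [] := by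
        rw [List.filter_eq_nil_iff]
        intro q hq hbq
        exact hk (List.mem_map.mpr ⟨q, hq, eq_of_beq hbq⟩)
      have hG' : pvGroups (sp ++ [(s, v)])
          = (PySem.List.dedup (sp.map (fun p => pvKey p.1))).map
              (fun pre => (pre, PySem.Dict.mk ((sp ++ [(s, v)]).filter (fun q => pvKey q.1 == pre))))
            ++ [(pvKey s, PySem.Dict.mk ((sp ++ [(s, v)]).filter (fun q => pvKey q.1 == pvKey s)))] := by
        unfold pvGroups
        simp only [List.map_append, List.map_cons, List.map_nil]
        rw [PySem.List.dedup_eq_ofList, PySem.Set.ofList_append_singleton,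
          PySem.Set.add_of_not_mem (fun hm => hk ((PySem.Set.mem_ofList _ _).mp hm)),
          ← PySem.List.dedup_eq_ofList, List.map_append, List.map_cons, List.map_nil]
      rw [hG', List.map_append]
      show _ ++ _ = (List.map (fun pre => (pre, PySem.Dict.mk ((sp ++ [(s, v)]).filter (fun q => pvKey q.1 == pre)))) (PySem.List.dedup (sp.map (fun p => pvKey p.1))))
            ++ [(pvKey s, PySem.Dict.mk ((sp ++ [(s, v)]).filter (fun q => pvKey q.1 == pvKey s)))]
      congr 1
      · unfold pvGroups
        rw [List.map_map]
        apply List.map_congr_left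
        intro pre hpre
        have hpk : pre ≠ pvKey s := by
          intro he
          exact hk (he ▸ (PySem.List.mem_dedup _ _).mp hpre)
        have hb1 : (pre == pvKey s) = false := beq_eq_false_iff_ne.mpr hpk
        have hb2 : (pvKey s == pre) = false := beq_eq_false_iff_ne.mpr (Ne.symm hpk)
        simp [List.filter_append, hb2]
        intro he
        exact absurd he hpk
      · simp only [List.map_cons, List.map_nil, beq_self_eq_true, if_true]
        refine congrArg (fun t => [(pvKey s, t)]) ?_
        rw [List.filter_append, hfilnil]
        apply PySem.Dict.ext
        rw [PySem.Dict.items_insert_of_not_contains _ _ (PySem.Dict.contains_empty _)]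
        simp [PySem.Dict.empty]

-- ===== VERDICT (by name: the statement is the Claim_ definition above) =====
theorem division_parser_spec : Claim_equal_division_parser := by
  intro sp _ hpre
  unfold Spec_division_parser division_parser division_parser_alt
  rw [pvFold_eq sp hpre]
  simp [pvGroups, List.map_map, Function.comp]
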